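-- pv_equiv track=rewrite | github.com/yuanyao366/douma_algo_training_camp | src/com/douma/written_test/tengxun/_20210826/_3_LargestInteger.py | largest_num
-- ===== SOURCE A (Python) =====
-- def largest_num(s, k):
--     n, ans = len(s), -2**31
--     # left 和 right 用于定义当前窗口的大小
--     # 注意：这个窗口是从右往左滑动的，和我们之前见过的窗口有点不一样
--     left = right = 0
--     # windowNum 用于维护当前窗口的整数大小
--     windowNum = 0
--     while right < n:
--         windowNum = windowNum * 10 + (ord(s[right]) - ord('0'))
--
--         # 当前窗口的大小为 k，也就是当前窗口中有 k 个字符了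
--         if right - left + 1 == k:
--             ans = max(ans, windowNum)
--             # 缩小窗口，这这里需要维护当前窗口的数字大小
--             # 也就是把当前窗口对应的数字的最高位减去掉即可
--             windowNum -= (ord(s[left]) - ord('0')) * int(pow(10, k - 1))
--             left += 1
--         right += 1
--
--     return ans
-- ===== SOURCE B (Python) =====
-- def largest_num(s, k):
--     # Recompute each length-k window independently and take the max,
--     # instead of maintaining a sliding window number.
--     n = len(s)
--     if k <= 0 or k > n:
--         return -2**31
--
--     def window_value(w):
--         v = 0
--         for c in w:
--             v = v * 10 + (ord(c) - ord('0'))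
--         return v
--
--     return max(-2**31, max(window_value(s[i:i + k]) for i in range(n - k + 1)))
-- ===== Notes on version B (the rewrite author's own statement) =====
-- stated objective: simpler
-- what changed: Replaces the sliding window that incrementally maintains the current window's number (append low digit, subtract leading digit times 10^(k-1)) with a direct max over independently recomputed length-k window values, guarded by an explicit k<=0 / k>len(s) check returning the -2^31 sentinel.
import Mathlib
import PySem

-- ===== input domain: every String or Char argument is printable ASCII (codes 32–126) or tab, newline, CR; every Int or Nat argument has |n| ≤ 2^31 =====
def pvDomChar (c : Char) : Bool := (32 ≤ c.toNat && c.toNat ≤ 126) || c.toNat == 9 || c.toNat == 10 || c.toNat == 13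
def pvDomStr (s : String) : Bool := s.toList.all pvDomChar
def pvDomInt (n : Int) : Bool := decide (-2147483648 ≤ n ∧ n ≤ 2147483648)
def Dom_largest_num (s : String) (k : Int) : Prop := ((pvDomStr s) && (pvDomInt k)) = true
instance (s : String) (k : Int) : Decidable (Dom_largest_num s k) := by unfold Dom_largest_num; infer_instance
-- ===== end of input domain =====

-- B recomputes each length-k window value independently and takes the max (simpler, one pass
-- per window), instead of A's sliding window maintained by digit arithmetic; return values agree.

-- ===== PORT A =====
-- while right < n with right += 1 each pass → fold over right ∈ range n;
-- state is (left, windowNum, ans); int(pow(10, k - 1)) is Python integer pow, exact.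
def largest_num (s : String) (k : Int) : Int :=
  let cs := s.toList
  (((List.range cs.length).foldl
      (fun (st : Int × Int × Int) (right : Nat) =>
        let wn := st.2.1 * 10 + (((cs.getD right ' ').toNat : Int) - 48)  -- s[right]: right < n always
        if (right : Int) - st.1 + 1 = k then
          (st.1 + 1,
           wn - (((cs.getD st.1.toNat ' ').toNat : Int) - 48) * 10 ^ (k - 1).toNat,  -- s[left]: in range
           max st.2.2 wn)
        else (st.1, wn, st.2.2))
      (0, 0, -2 ^ 31)).2.2)

-- ===== PORT B =====
def pvWindowValue (w : List Char) : Int :=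
  w.foldl (fun v c => v * 10 + ((c.toNat : Int) - 48)) 0

def largest_num_alt (s : String) (k : Int) : Int :=
  if k ≤ 0 ∨ (s.toList.length : Int) < k then -2 ^ 31
  else
    -- max(-2**31, max(window_value(s[i:i+k]) for i in range(n-k+1)))
    ((List.range (s.toList.length - k.toNat + 1)).map
        (fun i => pvWindowValue ((s.toList.drop i).take k.toNat))).foldl max (-2 ^ 31)

-- ===== PRECONDITION & SPEC =====
def Spec_largest_num (s : String) (k : Int) (out : Int) : Prop := out = largest_num_alt s k
instance (s : String) (k : Int) (out : Int) : Decidable (Spec_largest_num s k out) := by unfold Spec_largest_num; infer_instance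

-- ===== CLAIM (what is proved, stated in full; the proofs are below) =====
def Claim_equal_largest_num : Prop := ∀ (s : String) (k : Int), Dom_largest_num s k → Spec_largest_num s k (largest_num s k)

-- ===== LEMMAS AND PROOFS =====

theorem windowValue_init (w : List Char) (v : Int) :
    w.foldl (fun v c => v * 10 + ((c.toNat : Int) - 48)) v
      = v * 10 ^ w.length + pvWindowValue w := by
  induction w generalizing v with
  | nil => simp [pvWindowValue]
  | cons c t ih =>
      simp only [List.foldl_cons, List.length_cons, pvWindowValue] at *
      rw [ih, ih ((0:Int) * 10 + ((c.toNat : Int) - 48))]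
      ring

theorem windowValue_cons (c : Char) (t : List Char) :
    pvWindowValue (c :: t) = ((c.toNat : Int) - 48) * 10 ^ t.length + pvWindowValue t := by
  rw [show pvWindowValue (c :: t)
        = t.foldl (fun v c => v * 10 + ((c.toNat : Int) - 48))
            ((0 : Int) * 10 + ((c.toNat : Int) - 48)) from rfl,
     windowValue_init]
  ring

theorem windowValue_append_singleton (w : List Char) (c : Char) :
    pvWindowValue (w ++ [c]) = pvWindowValue w * 10 + ((c.toNat : Int) - 48) := by
  simp [pvWindowValue, List.foldl_append]

-- helper definitions for the proofs (used only below the claim block)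
def pvStep (cs : List Char) (k : Int) (st : Int × Int × Int) (right : Nat) : Int × Int × Int :=
  let wn := st.2.1 * 10 + (((cs.getD right ' ').toNat : Int) - 48)
  if (right : Int) - st.1 + 1 = k then
    (st.1 + 1,
     wn - (((cs.getD st.1.toNat ' ').toNat : Int) - 48) * 10 ^ (k - 1).toNat,
     max st.2.2 wn)
  else (st.1, wn, st.2.2)

def pvBest (cs : List Char) (kn : Nat) (m : Nat) : Int :=
  ((List.range m).map (fun i => pvWindowValue ((cs.drop i).take kn))).foldl max (-2 ^ 31)

theorem largest_num_eq_foldl (s : String) (k : Int) :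
    largest_num s k
      = ((List.range s.toList.length).foldl (pvStep s.toList k) (0, 0, -2 ^ 31)).2.2 := rfl

theorem pvBest_succ (cs : List Char) (kn m : Nat) :
    pvBest cs kn (m + 1) = max (pvBest cs kn m) (pvWindowValue ((cs.drop m).take kn)) := by
  simp only [pvBest, List.range_succ, List.map_append, List.map_cons, List.map_nil,
    List.foldl_append, List.foldl_cons, List.foldl_nil]

theorem pvBest_one (cs : List Char) (kn : Nat) :
    pvBest cs kn 1 = max (-2 ^ 31) (pvWindowValue ((cs.drop 0).take kn)) := by
  simp only [pvBest, List.range_one, List.map_cons, List.map_nil,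
    List.foldl_cons, List.foldl_nil]

theorem getD_eq (cs : List Char) (r : Nat) (h : r < cs.length) :
    cs.getD r ' ' = cs[r] := by
  simp [List.getD, List.getElem?_eq_getElem h]

theorem take_succ_eq (cs : List Char) (r : Nat) (h : r < cs.length) :
    cs.take (r + 1) = cs.take r ++ [cs.getD r ' '] := by
  rw [List.take_add_one, List.getElem?_eq_getElem h]
  simp [List.getD, List.getElem?_eq_getElem h]

theorem window_extend (cs : List Char) (i m : Nat) (h : i + m < cs.length) :
    (cs.drop i).take (m + 1) = (cs.drop i).take m ++ [cs.getD (i + m) ' '] := by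
  have h1 : m < (cs.drop i).length := by simp [List.length_drop]; omega
  rw [List.take_add_one, List.getElem?_eq_getElem h1]
  simp [List.getD, List.getElem?_eq_getElem h, List.getElem_drop]

theorem window_head (cs : List Char) (i m : Nat) (h : i + m < cs.length) :
    (cs.drop i).take (m + 1) = cs.getD i ' ' :: (cs.drop (i + 1)).take m := by
  have hi : i < cs.length := by omega
  rw [List.drop_eq_getElem_cons hi, List.take_succ_cons, getD_eq cs i hi]

theorem window_tail_len (cs : List Char) (i m : Nat) (h : i + m < cs.length) :
    ((cs.drop (i + 1)).take m).length = m := by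
  simp [List.length_take, List.length_drop]; omega

theorem window_sub (cs : List Char) (i m : Nat) (h : i + m < cs.length) :
    pvWindowValue ((cs.drop i).take (m + 1))
      - (((cs.getD i ' ').toNat : Int) - 48) * 10 ^ m
      = pvWindowValue ((cs.drop (i + 1)).take m) := by
  rw [window_head cs i m h, windowValue_cons, window_tail_len cs i m h]
  ring

theorem inv_trivial (cs : List Char) (k : Int)
    (h : ∀ r : Nat, r < cs.length → ((r : Int) + 1 ≠ k)) :
    ∀ m ≤ cs.length,
      ((List.range m).foldl (pvStep cs k) (0, 0, -2 ^ 31)).1 = 0 ∧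
      ((List.range m).foldl (pvStep cs k) (0, 0, -2 ^ 31)).2.2 = -2 ^ 31 := by
  intro m hm
  induction m with
  | zero => simp
  | succ m ih =>
      obtain ⟨h1, h2⟩ := ih (by omega)
      rw [List.range_succ, List.foldl_append, List.foldl_cons, List.foldl_nil]
      have hcond := h m (by omega)
      set st := (List.range m).foldl (pvStep cs k) (0, 0, -2 ^ 31) with hst
      clear_value st
      obtain ⟨l, wv, av⟩ := st
      simp only at h1 h2
      subst h1 h2
      simp [pvStep, hcond]

theorem inv_main (cs : List Char) (kn : Nat) (hk : 1 ≤ kn) (hkn : kn ≤ cs.length) :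
    ∀ m ≤ cs.length,
      (if m < kn then
        (List.range m).foldl (pvStep cs (kn : Int)) (0, 0, -2 ^ 31)
          = (0, pvWindowValue (cs.take m), -2 ^ 31)
       else
        (List.range m).foldl (pvStep cs (kn : Int)) (0, 0, -2 ^ 31)
          = (((m - kn + 1 : Nat) : Int),
             pvWindowValue ((cs.drop (m - kn + 1)).take (kn - 1)),
             pvBest cs kn (m - kn + 1))) := by
  obtain ⟨kp, rfl⟩ : ∃ kp, kn = kp + 1 := ⟨kn - 1, by omega⟩
  simp only [Nat.add_sub_cancel]
  intro m hm
  induction m with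
  | zero => simp [pvWindowValue]
  | succ m ih =>
      have ih := ih (by omega)
      rw [List.range_succ, List.foldl_append, List.foldl_cons, List.foldl_nil]
      have hmlt : m < cs.length := by omega
      have h10 : (((kp + 1 : Nat) : Int) - 1).toNat = kp := by push_cast; omega
      by_cases hcase : m + 1 < kp + 1
      · -- window not yet full
        rw [if_pos hcase]
        rw [if_pos (by omega)] at ih
        have hcond : ¬ ((m : Int) - (0 : Int) + 1 = ((kp + 1 : Nat) : Int)) := by
          push_cast; omega
        rw [ih]
        simp only [pvStep, hcond, if_false]
        rw [take_succ_eq cs m hmlt, windowValue_append_singleton]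
      · by_cases hfirst : m + 1 = kp + 1
        · -- first full window
          rw [if_neg hcase]
          rw [if_pos (by omega)] at ih
          have hcond : ((m : Int) - (0 : Int) + 1 = ((kp + 1 : Nat) : Int)) := by
            push_cast; omega
          rw [ih]
          simp only [pvStep, hcond, if_pos, Int.toNat_zero]
          have wnval : pvWindowValue (cs.take m) * 10 + (((cs.getD m ' ').toNat : Int) - 48)
              = pvWindowValue ((cs.drop 0).take (kp + 1)) := by
            rw [← windowValue_append_singleton, ← take_succ_eq cs m hmlt]
            simp [hfirst]
          simp only [Prod.mk.injEq]
          refine ⟨by omega, ?_, ?_⟩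
          · rw [wnval, h10, window_sub cs 0 kp (by omega),
                show m + 1 - (kp + 1) + 1 = 1 by omega]
          · rw [wnval, show m + 1 - (kp + 1) + 1 = 1 by omega, pvBest_one]
        · -- sliding step: m ≥ kp + 1
          have hge : kp + 1 ≤ m := by omega
          rw [if_neg hcase]
          rw [if_neg (by omega)] at ih
          set i := m - (kp + 1) + 1 with hi
          have hcond : ((m : Int) - ((i : Nat) : Int) + 1 = ((kp + 1 : Nat) : Int)) := by
            push_cast; omega
          rw [ih]
          simp only [pvStep, hcond, if_pos, Int.toNat_natCast]
          have hext : pvWindowValue ((cs.drop i).take kp) * 10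
                + (((cs.getD m ' ').toNat : Int) - 48)
              = pvWindowValue ((cs.drop i).take (kp + 1)) := by
            rw [window_extend cs i kp (by omega), windowValue_append_singleton,
                show i + kp = m by omega]
          simp only [Prod.mk.injEq]
          refine ⟨by push_cast; omega, ?_, ?_⟩
          · rw [hext, h10, window_sub cs i kp (by omega),
                show m + 1 - (kp + 1) + 1 = i + 1 by omega]
          · rw [hext, show m + 1 - (kp + 1) + 1 = i + 1 by omega, pvBest_succ cs (kp + 1) i]

-- ===== VERDICT (by name: the statement is the Claim_ definition above) =====
theorem largest_num_spec : Claim_equal_largest_num := by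
  intro s k _
  unfold Spec_largest_num largest_num_alt
  rw [largest_num_eq_foldl]
  set cs := s.toList with hcs
  by_cases htriv : k ≤ 0 ∨ (cs.length : Int) < k
  · rw [if_pos htriv]
    have h : ∀ r : Nat, r < cs.length → ((r : Int) + 1 ≠ k) := by
      intro r hr
      rcases htriv with h | h
      · omega
      · omega
    exact (inv_trivial cs k h cs.length le_rfl).2
  · rw [if_neg htriv]
    rw [not_or] at htriv
    obtain ⟨hk0, hkn⟩ := htriv
    have hkeq : ((k.toNat : Nat) : Int) = k := Int.toNat_of_nonneg (by omega)
    have hk1 : 1 ≤ k.toNat := by omega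
    have hle : k.toNat ≤ cs.length := by omega
    have hmain := inv_main cs k.toNat hk1 hle cs.length le_rfl
    rw [if_neg (by omega), hkeq] at hmain
    rw [hmain]
    rfl
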